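-- pv_equiv track=rewrite | github.com/nutakoe27-commits/englishbot | backend/app/session_recap.py | _coerce_words
-- ===== SOURCE A (Python) =====
-- def _coerce_words(value) -> list[str]:
--     if not isinstance(value, list):
--         return []
--     out: list[str] = []
--     seen: set[str] = set()
--     for item in value:
--         if not isinstance(item, str):
--             continue
--         word = item.strip().lower()
--         if not word or len(word) > 64:
--             continue
--         if word in seen:
--             continue
--         seen.add(word)
--         out.append(word)
--         if len(out) >= 7:
--             break
--     return out
-- ===== SOURCE B (Python) =====
-- def _coerce_words(value) -> list[str]:
--     if not isinstance(value, list):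
--         return []
--
--     def norm(item):
--         if not isinstance(item, str):
--             return None
--         w = item.strip().lower()
--         return w if w and len(w) <= 64 else None
--
--     def pick(items, k):
--         # select the first normalizable word, purge its duplicates from the
--         # remainder, recurse for the k-1 following words
--         if k == 0:
--             return []
--         for i, it in enumerate(items):
--             w = norm(it)
--             if w is not None:
--                 rest = [x for x in items[i + 1:] if norm(x) != w]
--                 return [w] + pick(rest, k - 1)
--         return []
--
--     return pick(value, 7)
-- ===== Notes on version B (the rewrite author's own statement) =====
-- stated objective: alternative
-- what changed: Replaces A's single fused pass with a seen-set, output accumulator and early break by a selection recursion: find the first normalizable word, filter every later item normalizing to it out of the remainder, and recurse with a count of 7 down to 0 (nub-by-filtering, no seen set and no accumulator).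
import Mathlib
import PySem

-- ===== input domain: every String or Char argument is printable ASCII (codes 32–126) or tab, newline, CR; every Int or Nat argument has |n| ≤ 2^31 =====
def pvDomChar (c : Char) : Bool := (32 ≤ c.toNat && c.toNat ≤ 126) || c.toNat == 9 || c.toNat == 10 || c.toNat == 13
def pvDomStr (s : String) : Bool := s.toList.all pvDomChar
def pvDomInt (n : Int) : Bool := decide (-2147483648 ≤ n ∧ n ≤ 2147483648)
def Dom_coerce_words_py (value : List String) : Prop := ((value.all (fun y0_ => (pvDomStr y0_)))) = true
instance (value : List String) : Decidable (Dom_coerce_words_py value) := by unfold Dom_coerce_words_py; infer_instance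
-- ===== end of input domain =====

-- B replaces A's fused seen-set pass (objective: alternative) by a selection recursion: take the
-- first valid word, filter its duplicates out of the remainder, recurse with a decreasing count.
-- The `isinstance` guards of the Python are vacuous under the List String typing and are not ported.

-- ===== PORT A =====
-- the fused loop: out is the accumulated result, seen the set of already-taken words; breaks once len(out) >= 7
def coerceLoopA : List String → List String → PySem.Set String → List String
  | [], out, _ => out
  | item :: rest, out, seen =>
    let word := PySem.Str.lower (PySem.Str.strip item)
    if word = "" ∨ 64 < PySem.Str.len word then
      coerceLoopA rest out seen
    else if PySem.Set.contains seen word then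
      coerceLoopA rest out seen
    else
      let out' := out ++ [word]
      let seen' := PySem.Set.add seen word
      if 7 ≤ out'.length then out' else coerceLoopA rest out' seen'

def coerce_words_py (value : List String) : List String :=
  coerceLoopA value [] PySem.Set.empty

-- ===== PORT B =====
-- norm(item) of Source B
def pvNormB (item : String) : Option String :=
  let w := PySem.Str.lower (PySem.Str.strip item)
  if w ≠ "" ∧ PySem.Str.len w ≤ 64 then some w else none

-- pick(items, k) of Source B: the for-loop scanning for the first normalizable item is the
-- skip-on-none recursion; on a hit it filters the remainder and recurses with k-1
def pvPickB (items : List String) (k : Nat) : List String :=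
  match k with
  | 0 => []
  | k' + 1 =>
    match items with
    | [] => []
    | it :: rest =>
      (pvNormB it).elim (pvPickB rest (k' + 1))
        (fun w => w :: pvPickB (rest.filter (fun x => pvNormB x ≠ some w)) k')
termination_by items.length
decreasing_by
  · simp
  · simp only [List.length_cons, List.length_unattach]
    exact Nat.lt_succ_of_le (Nat.le_trans (List.length_filter_le _ _)
      (Nat.le_of_eq List.length_attach))

def coerce_words_py_alt (value : List String) : List String :=
  pvPickB value 7

-- ===== PRECONDITION & SPEC =====
def Spec_coerce_words_py (value : List String) (out : List String) : Prop := out = coerce_words_py_alt value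
instance (value : List String) (out : List String) : Decidable (Spec_coerce_words_py value out) := by unfold Spec_coerce_words_py; infer_instance

-- ===== CLAIM (what is proved, stated in full; the proofs are below) =====
def Claim_equal_coerce_words_py : Prop := ∀ (value : List String), Dom_coerce_words_py value → Spec_coerce_words_py value (coerce_words_py value)

-- ===== LEMMAS AND PROOFS =====

-- A Set stays a prefix under update (add only ever appends)
theorem pv_update_prefix (xs : List String) (s : PySem.Set String) :
    s <+: PySem.Set.update s xs := by
  induction xs generalizing s with
  | nil => exact List.prefix_refl s
  | cons x rest ih =>
    refine List.IsPrefix.trans ?_ (ih (PySem.Set.add s x))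
    by_cases h : x ∈ s
    · rw [PySem.Set.add_of_mem h]
    · rw [PySem.Set.add_of_not_mem h]; exact List.prefix_append s [x]

-- A's loop with seen = out and fewer than 7 taken computes take 7 of out updated by the remaining normalized words
theorem pv_loopA_eq (l : List String) : ∀ (out : List String), out.length < 7 →
    coerceLoopA l out out = (PySem.Set.update out (l.filterMap pvNormB)).take 7 := by
  induction l with
  | nil =>
    intro out hlen
    simp [coerceLoopA, PySem.Set.update, List.take_of_length_le (Nat.le_of_lt hlen)]
  | cons item rest ih =>
    intro out hlen
    rw [coerceLoopA]
    by_cases hbad : PySem.Str.lower (PySem.Str.strip item) = "" ∨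
        64 < PySem.Str.len (PySem.Str.lower (PySem.Str.strip item))
    · rw [if_pos hbad, ih out hlen]
      have : pvNormB item = none := by
        unfold pvNormB
        rw [if_neg]
        rintro ⟨h1, h2⟩
        rcases hbad with h | h
        · exact h1 h
        · omega
      simp [this]
    · rw [if_neg hbad]
      push Not at hbad
      have hnorm : pvNormB item = some (PySem.Str.lower (PySem.Str.strip item)) := by
        unfold pvNormB; rw [if_pos hbad]
      by_cases hmem : PySem.Str.lower (PySem.Str.strip item) ∈ out
      · rw [if_pos (by simpa [PySem.Set.contains] using hmem), ih out hlen]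
        simp only [List.filterMap_cons, hnorm, PySem.Set.update, List.foldl_cons,
          PySem.Set.add_of_mem hmem]
      · rw [if_neg (by simpa [PySem.Set.contains] using hmem)]
        simp only []
        have hadd : PySem.Set.add out (PySem.Str.lower (PySem.Str.strip item)) =
            out ++ [PySem.Str.lower (PySem.Str.strip item)] := PySem.Set.add_of_not_mem hmem
        simp only [List.filterMap_cons, hnorm, PySem.Set.update, List.foldl_cons, hadd]
        by_cases hfull : 7 ≤ (out ++ [PySem.Str.lower (PySem.Str.strip item)]).length
        · rw [if_pos hfull]
          obtain ⟨t, ht⟩ := pv_update_prefix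
            (rest.filterMap pvNormB) (out ++ [PySem.Str.lower (PySem.Str.strip item)])
          rw [PySem.Set.update] at ht
          rw [← ht]
          have h7 : (out ++ [PySem.Str.lower (PySem.Str.strip item)]).length = 7 := by
            simp at hfull ⊢; omega
          rw [← h7, List.take_left]
        · rw [if_neg hfull]
          exact ih _ (by simp at hfull ⊢; omega)

-- filter by a Bool predicate commutes with ordered dedup
theorem pv_filter_comm (p q : String → Bool) (l : List String) :
    (l.filter p).filter q = (l.filter q).filter p := by
  simp [List.filter_filter, Bool.and_comm]

theorem pv_filter_ofList (p : String → Bool) (ns : List String) :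
    (PySem.Set.ofList ns).filter p = PySem.Set.ofList (ns.filter p) := by
  induction ns with
  | nil => rfl
  | cons y ns ih =>
    rw [PySem.Set.ofList_cons]
    have hdis : ∀ s : PySem.Set String, s.discard y = s.filter (fun z => !(z == y)) :=
      fun _ => rfl
    by_cases hp : p y
    · rw [List.filter_cons, if_pos hp]
      show y :: ((PySem.Set.ofList ns).discard y).filter p = _
      rw [hdis, pv_filter_comm, ih, List.filter_cons, if_pos hp, PySem.Set.ofList_cons, hdis]
    · rw [List.filter_cons, if_neg hp]
      show ((PySem.Set.ofList ns).discard y).filter p = _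
      rw [hdis, pv_filter_comm, ih, List.filter_cons, if_neg hp]
      refine List.filter_eq_self.mpr (fun a ha => ?_)
      have hamem : a ∈ ns.filter p := by simpa [PySem.Set.mem_ofList] using ha
      have hpa : p a = true := List.of_mem_filter hamem
      have hne : a ≠ y := fun h => hp (h ▸ hpa)
      simp [hne]

-- pulling the head of an ordered dedup out: ofList (w :: ns) = w :: ofList (ns without w)
theorem pv_ofList_cons_filter (ns : List String) (w : String) :
    PySem.Set.ofList (w :: ns) = w :: PySem.Set.ofList (ns.filter (fun y => !(y == w))) := by
  rw [PySem.Set.ofList_cons,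
    show (PySem.Set.ofList ns).discard w = (PySem.Set.ofList ns).filter (fun z => !(z == w))
      from rfl, pv_filter_ofList]

-- the filter on raw items commutes with normalization
theorem pv_filter_filterMap (rest : List String) (w : String) :
    (rest.filter (fun x => pvNormB x ≠ some w)).filterMap pvNormB =
      (rest.filterMap pvNormB).filter (fun y => !(y == w)) := by
  induction rest with
  | nil => rfl
  | cons x rest ih =>
    cases hx : pvNormB x with
    | none => simp [hx, ne_eq, decide_not] at ih ⊢; simpa using ih
    | some v =>
      by_cases hv : v = w
      · subst hv
        simp [hx, ne_eq, decide_not] at ih ⊢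
        simpa using ih
      · simp [hx, hv, ne_eq, decide_not] at ih ⊢
        simpa using ih

-- B's recursion computes take k of the ordered dedup of the normalized words
theorem pv_pickB_eq (n : Nat) : ∀ (l : List String), l.length ≤ n → ∀ (k : Nat),
    pvPickB l k = (PySem.Set.ofList (l.filterMap pvNormB)).take k := by
  induction n with
  | zero =>
    intro l hl k
    have : l = [] := List.eq_nil_of_length_eq_zero (Nat.le_zero.mp hl)
    subst this
    cases k <;> simp [pvPickB, PySem.Set.ofList_nil]
  | succ n ih =>
    intro l hl k
    cases l with
    | nil => cases k <;> simp [pvPickB, PySem.Set.ofList_nil]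
    | cons it rest =>
      cases k with
      | zero => simp [pvPickB]
      | succ k =>
        rw [pvPickB]
        cases hit : pvNormB it with
        | none =>
          simp only [List.filterMap_cons, hit, Option.elim]
          exact ih rest (by simpa using hl) (k + 1)
        | some w =>
          simp only [List.filterMap_cons, hit, Option.elim]
          rw [ih (rest.filter (fun x => pvNormB x ≠ some w))
              (le_trans (List.length_filter_le _ _) (by simpa using hl)) k,
            pv_filter_filterMap, pv_ofList_cons_filter, List.take_succ_cons]

-- ===== VERDICT (by name: the statement is the Claim_ definition above) =====
theorem coerce_words_py_spec : Claim_equal_coerce_words_py := by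
  intro value _
  show coerceLoopA value [] PySem.Set.empty = pvPickB value 7
  rw [show PySem.Set.empty = ([] : List String) from rfl,
      pv_loopA_eq value [] (by simp), pv_pickB_eq value.length value (le_refl _) 7]
  rfl
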